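-- pv_equiv track=rewrite | github.com/albert7617/trmnl-japanese | draw.py | get_center_semicolon_pos
-- ===== SOURCE A (Python) =====
-- def get_center_semicolon_pos(string: str) -> int:
--     idx = 0
--     length = len(string)
--     if string[length // 2] == ';':
--         return length // 2
--
--     while True:
--         idx += 1
--         left_idx = (length // 2) - idx
--         right_idx = (length // 2) + idx
--         if left_idx >= 0 and string[left_idx] == ';':
--             return left_idx
--         if right_idx < length and string[right_idx] == ';':
--             return right_idx
--         if left_idx < 0 and right_idx >= length:
--             break
--     return -1
-- ===== SOURCE B (Python) =====
-- def get_center_semicolon_pos(string: str) -> int: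
--     center = len(string) // 2
--     cands = [i for i, ch in enumerate(string) if ch == ';']
--     if not cands:
--         return -1
--     return min(cands, key=lambda i: (abs(i - center), i))
-- ===== Notes on version B (the rewrite author's own statement) =====
-- stated objective: simpler
-- what changed: Replaces A's hand-written expanding two-sided search loop around the center by one comprehension collecting all semicolon indices and a single min() with the lexicographic key (abs(i-center), i), which reproduces A's nearest-to-center, left-tie-break choice.
import Mathlib
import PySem

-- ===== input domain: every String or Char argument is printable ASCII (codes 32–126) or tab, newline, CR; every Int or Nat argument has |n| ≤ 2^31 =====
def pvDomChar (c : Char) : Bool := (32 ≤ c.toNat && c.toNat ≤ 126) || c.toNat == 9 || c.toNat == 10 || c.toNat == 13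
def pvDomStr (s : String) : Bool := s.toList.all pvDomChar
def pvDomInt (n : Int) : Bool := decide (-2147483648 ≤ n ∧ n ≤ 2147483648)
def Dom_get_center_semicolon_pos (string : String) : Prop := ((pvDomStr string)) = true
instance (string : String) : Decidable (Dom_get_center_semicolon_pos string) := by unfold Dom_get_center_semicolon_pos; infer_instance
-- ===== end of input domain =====

-- B replaces A's hand-written expanding two-sided search around the center by collecting all
-- semicolon indices and taking min with the lexicographic key (abs(i-center), i): simpler, same cost.

-- ===== PORT A =====
-- the 'while True' loop of A; idx starts at 1 and grows until both sides are exhausted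
def pvLoopA (cs : List Char) (idx : Nat) : Int :=
  let length : Int := cs.length
  let half : Int := PySem.Int.floordiv length 2
  let left_idx : Int := half - idx
  let right_idx : Int := half + idx
  if 0 ≤ left_idx ∧ PySem.List.pyGet? cs left_idx = some ';' then left_idx
  else if right_idx < length ∧ PySem.List.pyGet? cs right_idx = some ';' then right_idx
  else if left_idx < 0 ∧ length ≤ right_idx then -1
  else pvLoopA cs (idx + 1)
termination_by cs.length + 1 - idx
decreasing_by
  rename_i _ _ h3
  have hfd : PySem.Int.floordiv (cs.length : Int) 2 = ((cs.length / 2 : Nat) : Int) :=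
    PySem.Int.floordiv_natCast cs.length 2
  simp only [not_and_or, not_le, not_lt] at h3
  have hh : cs.length / 2 ≤ cs.length := Nat.div_le_self _ _
  rcases h3 with h | h <;> (simp only [left_idx, right_idx, half, length, hfd] at h; omega)

def get_center_semicolon_pos (string : String) : Int :=
  let cs := string.toList
  let length : Int := PySem.Str.len string
  let half : Int := PySem.Int.floordiv length 2
  if PySem.List.pyGet? cs half = some ';' then half
  else pvLoopA cs 1

-- ===== PORT B =====
def get_center_semicolon_pos_alt (string : String) : Int :=
  let center : Int := PySem.Int.floordiv (PySem.Str.len string) 2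
  let cands : List Int :=
    ((PySem.List.enumerate string.toList 0).filter (fun p => p.2 == ';')).map (·.1)
  if cands.isEmpty then -1
  else (PySem.List.min2? cands (fun i => |i - center|) (fun i => i)).getD (-1)

-- ===== PRECONDITION & SPEC =====
-- Pre_ excludes only the empty string, on which the Python A raises IndexError.
def Pre_get_center_semicolon_pos (string : String) : Prop := string ≠ ""
instance (string : String) : Decidable (Pre_get_center_semicolon_pos string) := by
  unfold Pre_get_center_semicolon_pos; infer_instance
def pvWitness_get_center_semicolon_pos : String := "a;b"

def Spec_get_center_semicolon_pos (string : String) (out : Int) : Prop := out = get_center_semicolon_pos_alt string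
instance (string : String) (out : Int) : Decidable (Spec_get_center_semicolon_pos string out) := by unfold Spec_get_center_semicolon_pos; infer_instance

-- ===== CLAIM (what is proved, stated in full; the proofs are below) =====
def Claim_equal_get_center_semicolon_pos : Prop := ∀ (string : String), Dom_get_center_semicolon_pos string → Pre_get_center_semicolon_pos string → Spec_get_center_semicolon_pos string (get_center_semicolon_pos string)


-- ===== LEMMAS AND PROOFS =====

-- the list of semicolon indices B builds
def pvLof (cs : List Char) : List Int :=
  ((PySem.List.enumerate cs 0).filter (fun p => p.2 == ';')).map (·.1)

-- the fold step of PySem.List.min2? (Int elements, Int keys), named so we can reason about it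
def pvStep (k1 k2 : Int → Int) (acc : Option Int) (x : Int) : Option Int :=
  match acc with
  | none => some x
  | some m =>
    if (decide (k1 x < k1 m) || !decide (k1 m < k1 x) && decide (k2 x < k2 m)) = true
    then some x else some m

theorem pvMin2_eq_foldl (k1 k2 : Int → Int) (xs : List Int) :
    PySem.List.min2? xs k1 k2 = xs.foldl (pvStep k1 k2) none := by
  unfold PySem.List.min2?
  congr 1
  funext acc x
  cases acc <;> rfl

theorem pvStep_some (k1 k2 : Int → Int) (a x : Int) :
    pvStep k1 k2 (some a) x =
      if k1 x < k1 a ∨ (¬ k1 a < k1 x ∧ k2 x < k2 a) then some x else some a := by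
  unfold pvStep
  by_cases h1 : k1 x < k1 a
  · simp [h1]
  · by_cases h2 : k1 a < k1 x
    · simp [h1, h2]
    · by_cases h3 : k2 x < k2 a <;> simp [h1, h2, h3]

theorem pvFoldl_step_strict (k1 k2 : Int → Int) (xs : List Int) :
    ∀ (a m : Int), m ∈ a :: xs →
    (∀ y ∈ a :: xs, y ≠ m → k1 m < k1 y ∨ (k1 m = k1 y ∧ k2 m < k2 y)) →
    xs.foldl (pvStep k1 k2) (some a) = some m := by
  induction xs with
  | nil =>
    intro a m hm _
    simp at hm
    simp [hm]
  | cons x t IH =>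
    intro a m hm hlt
    simp only [List.mem_cons] at hm
    rw [List.foldl_cons, pvStep_some]
    by_cases hc : k1 x < k1 a ∨ (¬ k1 a < k1 x ∧ k2 x < k2 a)
    · rw [if_pos hc]
      refine IH x m ?_ ?_
      · rcases hm with hma | hmx | hmt
        · by_cases hxm : x = m
          · simp [hxm]
          · exfalso
            subst hma
            rcases hlt x (by simp) hxm with h | ⟨h1, h2⟩ <;>
              rcases hc with h' | ⟨h1', h2'⟩ <;> linarith
        · simp [hmx]
        · simp [hmt]
      · intro y hy hym
        refine hlt y ?_ hym
        simp only [List.mem_cons] at hy ⊢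
        tauto
    · rw [if_neg hc]
      refine IH a m ?_ ?_
      · rcases hm with hma | hmx | hmt
        · simp [hma]
        · by_cases ham : a = m
          · simp [ham]
          · exfalso
            subst hmx
            push_neg at hc
            rcases hlt a (by simp) ham with h | ⟨h1, h2⟩
            · linarith [hc.1]
            · have := hc.2 (le_of_eq h1)
              linarith
        · simp [hmt]
      · intro y hy hym
        refine hlt y ?_ hym
        simp only [List.mem_cons] at hy ⊢
        tauto

-- a strictly lex-least element of xs is what min2? returns
theorem pvMin2_strict (k1 k2 : Int → Int) (xs : List Int) (m : Int)
    (hm : m ∈ xs)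
    (hlt : ∀ y ∈ xs, y ≠ m → k1 m < k1 y ∨ (k1 m = k1 y ∧ k2 m < k2 y)) :
    PySem.List.min2? xs k1 k2 = some m := by
  cases xs with
  | nil => simp at hm
  | cons a t =>
    rw [pvMin2_eq_foldl, List.foldl_cons]
    have h0 : pvStep k1 k2 none a = some a := rfl
    rw [h0]
    exact pvFoldl_step_strict k1 k2 t a m hm hlt

theorem pvMem_Lof (cs : List Char) (y : Int) :
    y ∈ pvLof cs ↔ ∃ (k : Nat) (hk : k < cs.length), y = (k : Int) ∧ cs[k] = ';' := by
  unfold pvLof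
  constructor
  · intro hy
    rw [List.mem_map] at hy
    obtain ⟨p, hp, hyp⟩ := hy
    rw [List.mem_filter] at hp
    obtain ⟨hmem, hc⟩ := hp
    rw [PySem.List.mem_enumerate_iff] at hmem
    obtain ⟨k, hk, hpk⟩ := hmem
    refine ⟨k, hk, ?_, ?_⟩
    · rw [← hyp, hpk]; simp
    · have h2 : p.2 = ';' := by simpa using hc
      rw [hpk] at h2
      simpa using h2
  · rintro ⟨k, hk, hy, hc⟩
    rw [List.mem_map]
    refine ⟨((k : Int), cs[k]), ?_, by simp [hy]⟩
    rw [List.mem_filter]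
    refine ⟨?_, by simp [hc]⟩
    rw [PySem.List.mem_enumerate_iff]
    exact ⟨k, hk, by simp⟩

-- B's result, written unconditionally through min2?
theorem pvAlt_eq (s : String) :
    get_center_semicolon_pos_alt s =
      (PySem.List.min2? (pvLof s.toList)
        (fun i => |i - ((s.toList.length / 2 : Nat) : Int)|) (fun i => i)).getD (-1) := by
  have hcast : PySem.Int.floordiv (PySem.Str.len s) 2 = ((s.toList.length / 2 : Nat) : Int) := by
    rw [PySem.Str.len_eq]
    exact PySem.Int.floordiv_natCast _ 2
  have hL : ((PySem.List.enumerate s.toList 0).filter (fun p => p.2 == ';')).map (·.1) =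
      pvLof s.toList := rfl
  simp only [get_center_semicolon_pos_alt, hcast, hL]
  by_cases h : pvLof s.toList = []
  · rw [h]
    simp [pvMin2_eq_foldl]
  · rw [if_neg (by simpa using h)]

-- main loop invariant: if every semicolon lies at distance ≥ d from the center,
-- A's loop from idx = d computes B's nearest-with-left-tie-break minimum
theorem pvLoopA_eq (cs : List Char) :
    ∀ (fuel d : Nat), cs.length + 1 - d = fuel → 1 ≤ d →
    (∀ (k : Nat), (hk : k < cs.length) → cs[k] = ';' →
      (d : Int) ≤ |(k : Int) - ((cs.length / 2 : Nat) : Int)|) →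
    pvLoopA cs d =
      (PySem.List.min2? (pvLof cs)
        (fun i => |i - ((cs.length / 2 : Nat) : Int)|) (fun i => i)).getD (-1) := by
  intro fuel
  induction fuel using Nat.strong_induction_on with
  | _ fuel IH =>
  intro d hf hd hno
  have hfd : PySem.Int.floordiv ((cs.length : Int)) 2 = ((cs.length / 2 : Nat) : Int) :=
    PySem.Int.floordiv_natCast cs.length 2
  rw [pvLoopA]
  simp only [hfd]
  split_ifs with h1 h2 h3
  · -- A returns the left index c - d
    obtain ⟨hge, hsem⟩ := h1
    have hdc : d ≤ cs.length / 2 := by omega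
    have hkcast : ((cs.length / 2 : Nat) : Int) - (d : Int) =
        ((cs.length / 2 - d : Nat) : Int) := by omega
    rw [hkcast] at hsem ⊢
    have hklt : cs.length / 2 - d < cs.length := by omega
    rw [PySem.List.pyGet?_natCast, List.getElem?_eq_getElem hklt] at hsem
    have hsem' : cs[cs.length / 2 - d] = ';' := Option.some_inj.mp hsem
    rw [pvMin2_strict _ _ _ ((cs.length / 2 - d : Nat) : Int) ?_ ?_, Option.getD_some]
    · exact (pvMem_Lof cs _).mpr ⟨_, hklt, rfl, hsem'⟩
    · intro y hy hne
      obtain ⟨k, hk2, rfl, hck⟩ := (pvMem_Lof cs y).mp hy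
      have h' := hno k hk2 hck
      have hmkey : |((cs.length / 2 - d : Nat) : Int) - ((cs.length / 2 : Nat) : Int)| =
          (d : Int) := by
        rw [show ((cs.length / 2 - d : Nat) : Int) - ((cs.length / 2 : Nat) : Int) =
          -(d : Int) by omega, abs_neg, Int.abs_natCast]
      by_cases habs : |(k : Int) - ((cs.length / 2 : Nat) : Int)| = (d : Int)
      · right
        refine ⟨by rw [hmkey, habs], ?_⟩
        rcases (abs_eq (Int.natCast_nonneg d)).mp habs with he | he
        · omega
        · exact absurd (by omega : (k : Int) = ((cs.length / 2 - d : Nat) : Int)) hne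
      · left
        rw [hmkey]
        exact lt_of_le_of_ne h' (Ne.symm habs)
  · -- A returns the right index c + d
    obtain ⟨hrt, hsem⟩ := h2
    have hkcast : ((cs.length / 2 : Nat) : Int) + (d : Int) =
        ((cs.length / 2 + d : Nat) : Int) := by omega
    have hcd : cs.length / 2 + d < cs.length := by omega
    rw [hkcast] at hsem ⊢
    rw [PySem.List.pyGet?_natCast, List.getElem?_eq_getElem hcd] at hsem
    have hsem' : cs[cs.length / 2 + d] = ';' := Option.some_inj.mp hsem
    rw [pvMin2_strict _ _ _ ((cs.length / 2 + d : Nat) : Int) ?_ ?_, Option.getD_some]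
    · exact (pvMem_Lof cs _).mpr ⟨_, hcd, rfl, hsem'⟩
    · intro y hy hne
      obtain ⟨k, hk2, rfl, hck⟩ := (pvMem_Lof cs y).mp hy
      have h' := hno k hk2 hck
      have hmkey : |((cs.length / 2 + d : Nat) : Int) - ((cs.length / 2 : Nat) : Int)| =
          (d : Int) := by
        rw [show ((cs.length / 2 + d : Nat) : Int) - ((cs.length / 2 : Nat) : Int) =
          (d : Int) by omega, Int.abs_natCast]
      by_cases habs : |(k : Int) - ((cs.length / 2 : Nat) : Int)| = (d : Int)
      · exfalso
        rcases (abs_eq (Int.natCast_nonneg d)).mp habs with he | he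
        · exact hne (by omega)
        · apply h1
          refine ⟨by omega, ?_⟩
          rw [show ((cs.length / 2 : Nat) : Int) - (d : Int) = (k : Int) by omega,
            PySem.List.pyGet?_natCast, List.getElem?_eq_getElem hk2, hck]
      · left
        rw [hmkey]
        exact lt_of_le_of_ne h' (Ne.symm habs)
  · -- both sides exhausted: no semicolon at all
    have hnil : pvLof cs = [] := by
      rw [List.eq_nil_iff_forall_not_mem]
      intro y hy
      obtain ⟨k, hk2, rfl, hck⟩ := (pvMem_Lof cs y).mp hy
      have h' := hno k hk2 hck
      rcases abs_cases ((k : Int) - ((cs.length / 2 : Nat) : Int)) with ⟨he, _⟩ | ⟨he, _⟩ <;>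
        rw [he] at h' <;> omega
    rw [hnil, pvMin2_eq_foldl]
    rfl
  · -- recurse at distance d + 1
    have hdn : d ≤ cs.length := by
      simp only [not_and_or, not_lt, not_le] at h3
      rcases h3 with h | h <;> omega
    apply IH (cs.length + 1 - (d + 1)) (by omega) (d + 1) rfl (by omega)
    intro k hk2 hck
    have h' := hno k hk2 hck
    by_cases habs : |(k : Int) - ((cs.length / 2 : Nat) : Int)| = (d : Int)
    · exfalso
      rcases (abs_eq (Int.natCast_nonneg d)).mp habs with he | he
      · apply h2
        refine ⟨by omega, ?_⟩
        rw [show ((cs.length / 2 : Nat) : Int) + (d : Int) = (k : Int) by omega,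
          PySem.List.pyGet?_natCast, List.getElem?_eq_getElem hk2, hck]
      · apply h1
        refine ⟨by omega, ?_⟩
        rw [show ((cs.length / 2 : Nat) : Int) - (d : Int) = (k : Int) by omega,
          PySem.List.pyGet?_natCast, List.getElem?_eq_getElem hk2, hck]
    · have hstrict : (d : Int) < |(k : Int) - ((cs.length / 2 : Nat) : Int)| :=
        lt_of_le_of_ne h' (Ne.symm habs)
      exact le_trans (le_of_eq (by push_cast; ring)) (Int.add_one_le_iff.mpr hstrict)


-- ===== VERDICT (by name: the statement is the Claim_ definition above) =====
theorem get_center_semicolon_pos_spec : Claim_equal_get_center_semicolon_pos := by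
  intro s _ hpre
  unfold Spec_get_center_semicolon_pos
  rw [pvAlt_eq]
  have hne : s.toList ≠ [] := fun h => hpre (String.toList_eq_nil_iff.mp h)
  have hn : 0 < s.toList.length := List.length_pos_iff.mpr hne
  unfold get_center_semicolon_pos
  have hfd : PySem.Int.floordiv (PySem.Str.len s) 2 = ((s.toList.length / 2 : Nat) : Int) := by
    rw [PySem.Str.len_eq]
    exact PySem.Int.floordiv_natCast _ 2
  simp only [hfd]
  by_cases hcent : PySem.List.pyGet? s.toList ((s.toList.length / 2 : Nat) : Int) = some ';'
  · rw [if_pos hcent]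
    have hclt : s.toList.length / 2 < s.toList.length := Nat.div_lt_self hn (by norm_num)
    rw [PySem.List.pyGet?_natCast, List.getElem?_eq_getElem hclt] at hcent
    have hsem : s.toList[s.toList.length / 2] = ';' := Option.some_inj.mp hcent
    rw [pvMin2_strict _ _ _ ((s.toList.length / 2 : Nat) : Int) ?_ ?_, Option.getD_some]
    · exact (pvMem_Lof _ _).mpr ⟨_, hclt, rfl, hsem⟩
    · intro y hy hne2
      obtain ⟨k, hk2, rfl, hck⟩ := (pvMem_Lof _ y).mp hy
      left
      simp only [sub_self, abs_zero]
      exact abs_pos.mpr (sub_ne_zero.mpr hne2)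
  · rw [if_neg hcent]
    refine pvLoopA_eq s.toList (s.toList.length + 1 - 1) 1 rfl le_rfl ?_
    intro k hk2 hck
    have hkne : (k : Int) - ((s.toList.length / 2 : Nat) : Int) ≠ 0 := by
      intro he
      apply hcent
      rw [show ((s.toList.length / 2 : Nat) : Int) = (k : Int) by omega,
        PySem.List.pyGet?_natCast, List.getElem?_eq_getElem hk2, hck]
    simpa using Int.one_le_abs hkne
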